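-- pv_equiv track=rewrite | github.com/lorenzo-biava/NLPLab | Morphology-Syntax/pcfg_parser_utils.py | to_universal_tags
-- ===== SOURCE A (Python) =====
-- def to_universal_tags(text):
--     #universal_treebank_pos_tags = ('ADJ', 'ADP', 'ADV', 'CONJ', 'DET', 'NOUN', 'NUM', 'PRON', '.', 'VERB', 'X')
--     replacements = {
--         # ARTICOLI
--         'ART': 'DET',
--         # AVVERBI
--         'ADVB': 'ADV',
--         # VERBI
--         'VAU': 'VERB', 'VCA': 'VERB', 'VMO': 'VERB', 'VMA': 'VERB',
--         # NOMI
--         'NOU': 'NOUN',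
--         # PREPOSIZIONI
--         'PREP': 'ADP',
--         # PRONOMI
--         'PRO': 'PRON',
--         # NUMERI
--         'NUMR': 'NUM',
--         # PUNCT
--         'PUNCT': '.'
--     }
--
--     for repl_old, rep_new in replacements.items():
--         text = text.replace('(' + repl_old, '(' + rep_new)
--     return text
-- ===== SOURCE B (Python) =====
-- import re
--
-- _REPLACEMENTS = {
--     'ART': 'DET', 'ADVB': 'ADV',
--     'VAU': 'VERB', 'VCA': 'VERB', 'VMO': 'VERB', 'VMA': 'VERB',
--     'NOU': 'NOUN', 'PREP': 'ADP', 'PRO': 'PRON', 'NUMR': 'NUM', 'PUNCT': '.',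
-- }
--
-- _PATTERN = re.compile(r'\((' + '|'.join(map(re.escape, _REPLACEMENTS)) + r')')
--
--
-- def to_universal_tags(text):
--     return _PATTERN.sub(lambda m: '(' + _REPLACEMENTS[m.group(1)], text)
-- ===== Notes on version B (the rewrite author's own statement) =====
-- stated objective: idiomatic
-- what changed: Replaces the loop of eleven sequential str.replace passes over the whole text with a single precompiled regex alternation pass (one left-to-right scan with a replacement function), valid because no key is a prefix of another and no replacement value re-creates a later match.
import Mathlib
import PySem

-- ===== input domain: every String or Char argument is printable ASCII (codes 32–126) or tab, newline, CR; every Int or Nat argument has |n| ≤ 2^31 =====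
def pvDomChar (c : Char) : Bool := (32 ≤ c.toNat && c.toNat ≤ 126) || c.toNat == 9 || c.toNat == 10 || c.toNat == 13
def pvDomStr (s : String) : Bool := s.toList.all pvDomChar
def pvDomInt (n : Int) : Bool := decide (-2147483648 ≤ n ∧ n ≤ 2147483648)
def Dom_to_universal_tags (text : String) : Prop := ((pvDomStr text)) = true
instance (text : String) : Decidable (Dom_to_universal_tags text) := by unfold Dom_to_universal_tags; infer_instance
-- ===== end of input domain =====

-- B replaces A's eleven sequential str.replace passes by one precompiled-regex scan; equivalence of return values is proved (no mutation involved).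

-- ===== PORT A =====
-- the dict literal `replacements`, as an association list in insertion order
def pvReplacements : List (String × String) :=
  [("ART", "DET"), ("ADVB", "ADV"),
   ("VAU", "VERB"), ("VCA", "VERB"), ("VMO", "VERB"), ("VMA", "VERB"),
   ("NOU", "NOUN"), ("PREP", "ADP"), ("PRO", "PRON"), ("NUMR", "NUM"), ("PUNCT", ".")]

-- for repl_old, rep_new in replacements.items(): text = text.replace('(' + repl_old, '(' + rep_new)
def to_universal_tags (text : String) : String :=
  pvReplacements.foldl (fun t kv => PySem.Str.replace t ("(" ++ kv.1) ("(" ++ kv.2)) text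

-- ===== PORT B =====
-- Source B's dict, shared by the pattern and the replacement lambda
def pvAltPairs : List (String × String) :=
  [("ART", "DET"), ("ADVB", "ADV"),
   ("VAU", "VERB"), ("VCA", "VERB"), ("VMO", "VERB"), ("VMA", "VERB"),
   ("NOU", "NOUN"), ("PREP", "ADP"), ("PRO", "PRON"), ("NUMR", "NUM"), ("PUNCT", ".")]

-- one left-to-right scan, as re.sub performs it: at each position try to match
-- '\((k1|k2|…)' (alternatives in pattern order); on a match emit '(' + replacement
-- and resume after the matched text, otherwise emit the character and move on.
def pvAltGo (l : List Char) : List Char :=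
  match l with
  | [] => []
  | c :: t =>
    if c = '(' then
      match pvAltPairs.find? (fun kv => kv.1.toList.isPrefixOf t) with
      | some kv => '(' :: (kv.2.toList ++ pvAltGo (t.drop kv.1.toList.length))
      | none => c :: pvAltGo t
    else c :: pvAltGo t
termination_by l.length
decreasing_by all_goals (simp [List.length_drop]; try omega)

def to_universal_tags_alt (text : String) : String :=
  String.ofList (pvAltGo text.toList)

-- ===== PRECONDITION & SPEC =====
def Spec_to_universal_tags (text : String) (out : String) : Prop := out = to_universal_tags_alt text
instance (text : String) (out : String) : Decidable (Spec_to_universal_tags text out) := by unfold Spec_to_universal_tags; infer_instance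

-- ===== CLAIM (what is proved, stated in full; the proofs are below) =====
def Claim_equal_to_universal_tags : Prop := ∀ (text : String), Dom_to_universal_tags text → Spec_to_universal_tags text (to_universal_tags text)

-- ===== LEMMAS AND PROOFS =====

-- structural characterisation of one str.replace pass (pattern nonempty)
def replOne (old nw : List Char) : List Char → List Char
  | [] => []
  | c :: t =>
    if old <+: (c :: t) then nw ++ replOne old nw (t.drop (old.length - 1))
    else c :: replOne old nw t
termination_by l => l.length
decreasing_by all_goals (simp [List.length_drop]; try omega)

-- the char-level pair list both chains run over
def pvPairsL : List (List Char × List Char) :=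
  pvAltPairs.map (fun kv => (kv.1.toList, kv.2.toList))

def pvStep (s : List Char) (kv : List Char × List Char) : List Char :=
  replOne ('(' :: kv.1) ('(' :: kv.2) s

lemma pv_go_spec (old nw : List Char) (hold : old ≠ []) :
    ∀ (fuel : Nat) (l acc : List Char), l.length ≤ fuel →
      PySem.Chars.replace.go old nw fuel l acc = acc.reverse ++ replOne old nw l := by
  intro fuel
  induction fuel with
  | zero =>
    intro l acc h
    have : l = [] := List.eq_nil_of_length_eq_zero (Nat.le_zero.mp h)
    subst this
    simp [PySem.Chars.replace.go, replOne]
  | succ n ih =>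
    intro l acc h
    cases l with
    | nil => simp [PySem.Chars.replace.go, replOne]
    | cons c t =>
      obtain ⟨o, os, rfl⟩ : ∃ o os, old = o :: os := by
        cases old with
        | nil => exact absurd rfl hold
        | cons o os => exact ⟨o, os, rfl⟩
      by_cases hp : (o :: os) <+: (c :: t)
      · rw [PySem.Chars.replace.go, if_pos (List.isPrefixOf_iff_prefix.mpr hp)]
        rw [replOne, if_pos hp]
        have hlen : (List.drop (o :: os).length (c :: t)).length ≤ n := by
          simp only [List.length_drop, List.length_cons] at *
          omega
        rw [ih _ _ hlen]
        simp [List.drop_succ_cons]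
      · rw [PySem.Chars.replace.go,
          if_neg (by rw [List.isPrefixOf_iff_prefix]; exact hp)]
        rw [replOne, if_neg hp]
        have hlen : t.length ≤ n := by simp at h; omega
        rw [ih _ _ hlen]
        simp

lemma pv_replace_eq (old nw s : List Char) (hold : old ≠ []) :
    PySem.Chars.replace s old nw = replOne old nw s := by
  rw [PySem.Chars.replace, if_neg (by simp [List.isEmpty_iff, hold]),
    pv_go_spec old nw hold s.length s [] le_rfl]
  simp

lemma pv_replOne_cons_neg {old : List Char} (nw : List Char) {c : Char} {t : List Char}
    (h : ¬ old <+: (c :: t)) : replOne old nw (c :: t) = c :: replOne old nw t := by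
  rw [replOne, if_neg h]

lemma pv_replOne_hit (k nw x : List Char) :
    replOne ('(' :: k) nw (('(' :: k) ++ x) = nw ++ replOne ('(' :: k) nw x := by
  rw [show ('(' :: k) ++ x = '(' :: (k ++ x) from rfl, replOne,
    if_pos (by exact List.cons_prefix_cons.mpr ⟨rfl, List.prefix_append k x⟩)]
  simp

lemma pv_replOne_skip (k nw : List Char) :
    ∀ (u x : List Char), '(' ∉ u →
      replOne ('(' :: k) nw (u ++ x) = u ++ replOne ('(' :: k) nw x := by
  intro u
  induction u with
  | nil => intro x _; rfl
  | cons d u' ih =>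
    intro x hu
    have hd : d ≠ '(' := fun h => hu (h ▸ List.mem_cons_self ..)
    rw [List.cons_append, pv_replOne_cons_neg nw
      (fun h => hd (List.cons_prefix_cons.mp h).1.symm), ih x (fun h => hu (List.mem_cons_of_mem _ h)), List.cons_append]

lemma pv_prefix_append_excl {a b : List Char} (x : List Char)
    (h1 : ¬ a <+: b) (h2 : ¬ b <+: a) : ¬ a <+: (b ++ x) := by
  intro h
  rcases List.prefix_or_prefix_of_prefix h (List.prefix_append b x) with h' | h'
  · exact h1 h'
  · exact h2 h'

-- position-0 prefix status of a '('-free word is invariant under one replace pass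
lemma pv_inv (k v : List Char) :
    ∀ (n : Nat) (s : List Char), s.length ≤ n → ∀ (k' : List Char), '(' ∉ k' →
      (k' <+: replOne ('(' :: k) ('(' :: v) s ↔ k' <+: s) := by
  intro n
  induction n with
  | zero =>
    intro s h k' _
    have : s = [] := List.eq_nil_of_length_eq_zero (Nat.le_zero.mp h)
    subst this
    rw [show replOne ('(' :: k) ('(' :: v) [] = [] from by rw [replOne]]
  | succ n ih =>
    intro s h k' hk'
    cases s with
    | nil => rw [show replOne ('(' :: k) ('(' :: v) [] = [] from by rw [replOne]]
    | cons c t =>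
      cases k' with
      | nil => simp
      | cons h' k'' =>
        have hh' : h' ≠ '(' := fun he => hk' (he ▸ List.mem_cons_self ..)
        by_cases hp : ('(' :: k) <+: (c :: t)
        · have hc : c = '(' := ((List.cons_prefix_cons.mp hp).1).symm
          rw [replOne, if_pos hp, List.cons_append]
          constructor
          · intro hx
            exact absurd (List.cons_prefix_cons.mp hx).1 hh'
          · intro hx
            exact absurd ((List.cons_prefix_cons.mp hx).1.trans hc) hh'
        · rw [pv_replOne_cons_neg _ hp, List.cons_prefix_cons, List.cons_prefix_cons]
          exact and_congr_right fun _ =>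
            ih t (by simp at h; omega) k'' (fun hm => hk' (List.mem_cons_of_mem _ hm))

lemma pv_chain_cons {c : Char} (hc : c ≠ '(') :
    ∀ (ks : List (List Char × List Char)) (s : List Char),
      ks.foldl pvStep (c :: s) = c :: ks.foldl pvStep s := by
  intro ks
  induction ks with
  | nil => intro s; rfl
  | cons kv ks' ih =>
    intro s
    rw [List.foldl_cons, List.foldl_cons,
      show pvStep (c :: s) kv = c :: pvStep s kv from
        pv_replOne_cons_neg _ (fun h => hc ((List.cons_prefix_cons.mp h).1.symm)),
      ih]

lemma pv_chain_nil : ∀ (ks : List (List Char × List Char)), ks.foldl pvStep [] = [] := by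
  intro ks
  induction ks with
  | nil => rfl
  | cons kv ks' ih =>
    rw [List.foldl_cons, show pvStep [] kv = [] from by rw [pvStep, replOne], ih]

lemma pv_chain_nomatch :
    ∀ (ks : List (List Char × List Char)) (t : List Char),
      (∀ kv ∈ ks, '(' ∉ kv.1) →
      (∀ kv ∈ ks, ¬ kv.1 <+: t) →
      ks.foldl pvStep ('(' :: t) = '(' :: ks.foldl pvStep t := by
  intro ks
  induction ks with
  | nil => intro t _ _; rfl
  | cons kv ks' ih =>
    intro t hpar hpre
    rw [List.foldl_cons, List.foldl_cons,
      show pvStep ('(' :: t) kv = '(' :: pvStep t kv from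
        pv_replOne_cons_neg _ (fun h =>
          hpre kv (List.mem_cons_self ..) (List.cons_prefix_cons.mp h).2),
      ih (pvStep t kv) (fun a ha => hpar a (List.mem_cons_of_mem _ ha))
        (fun a ha hp => hpre a (List.mem_cons_of_mem _ ha)
          ((pv_inv kv.1 kv.2 t.length t le_rfl a.1 (hpar a (List.mem_cons_of_mem _ ha))).mp hp))]

lemma pv_chain_pass (u : List Char) (hu : '(' ∉ u) :
    ∀ (ks : List (List Char × List Char)) (t : List Char),
      (∀ kv ∈ ks, ¬ kv.1 <+: u ∧ ¬ u <+: kv.1) →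
      ks.foldl pvStep ('(' :: (u ++ t)) = '(' :: (u ++ ks.foldl pvStep t) := by
  intro ks
  induction ks with
  | nil => intro t _; rfl
  | cons kv ks' ih =>
    intro t hks
    have hkv := hks kv (List.mem_cons_self ..)
    rw [List.foldl_cons, List.foldl_cons,
      show pvStep ('(' :: (u ++ t)) kv = '(' :: (u ++ pvStep t kv) from by
        rw [pvStep, pv_replOne_cons_neg _ (fun h =>
          pv_prefix_append_excl t hkv.1 hkv.2 (List.cons_prefix_cons.mp h).2),
          pv_replOne_skip _ _ u t hu]; rfl,
      ih (pvStep t kv) (fun a ha => hks a (List.mem_cons_of_mem _ ha))]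

-- no key or value contains '('
lemma pvF1 : ∀ kv ∈ pvPairsL, '(' ∉ kv.1 ∧ '(' ∉ kv.2 := by decide

-- no key is a prefix of another key, and no value re-creates a later (or earlier) key
lemma pvF2 : pvPairsL.Pairwise
    (fun a b => ¬ a.1 <+: b.1 ∧ ¬ b.1 <+: a.1 ∧ ¬ b.1 <+: a.2 ∧ ¬ a.2 <+: b.1) := by decide

lemma pv_main : ∀ (n : Nat) (l : List Char), l.length ≤ n →
    pvPairsL.foldl pvStep l = pvAltGo l := by
  intro n
  induction n with
  | zero =>
    intro l h
    have : l = [] := List.eq_nil_of_length_eq_zero (Nat.le_zero.mp h)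
    subst this
    rw [pv_chain_nil, pvAltGo]
  | succ n ih =>
    intro l h
    cases l with
    | nil => rw [pv_chain_nil, pvAltGo]
    | cons c t =>
      have ht : t.length ≤ n := by simp at h; omega
      by_cases hc : c = '('
      · subst hc
        cases hf : pvAltPairs.find? (fun kv => kv.1.toList.isPrefixOf t) with
        | none =>
          have hfl : pvPairsL.find? (fun kv => kv.1.isPrefixOf t) = none := by
            rw [pvPairsL, List.find?_map,
              show ((fun kv => kv.1.isPrefixOf t) ∘ fun kv : String × String =>
                (kv.1.toList, kv.2.toList)) = (fun kv => kv.1.toList.isPrefixOf t) from rfl, hf]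
            rfl
          rw [pv_chain_nomatch pvPairsL t (fun kv hm => (pvF1 kv hm).1)
              (fun kv hm hp => (List.find?_eq_none.mp hfl kv hm)
                (List.isPrefixOf_iff_prefix.mpr hp)),
            ih t ht, pvAltGo]
          simp [hf]
        | some kv =>
          have hfl : pvPairsL.find? (fun kv => kv.1.isPrefixOf t)
              = some (kv.1.toList, kv.2.toList) := by
            rw [pvPairsL, List.find?_map,
              show ((fun kv => kv.1.isPrefixOf t) ∘ fun kv : String × String =>
                (kv.1.toList, kv.2.toList)) = (fun kv => kv.1.toList.isPrefixOf t) from rfl, hf]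
            rfl
          obtain ⟨hpkv, as, bs, hdec, hfail⟩ := List.find?_eq_some_iff_append.mp hfl
          obtain ⟨r, hr⟩ := List.isPrefixOf_iff_prefix.mp hpkv
          have hmemkv : (kv.1.toList, kv.2.toList) ∈ pvPairsL := by
            rw [hdec]; exact List.mem_append_right _ (List.mem_cons_self ..)
          have hparen := pvF1 _ hmemkv
          have hpair := pvF2
          rw [hdec, List.pairwise_append, List.pairwise_cons] at hpair
          have hdrop : t.drop kv.1.toList.length = r := by
            rw [← hr, List.drop_left]
          -- run the chain: the keys before kv pass over, kv fires, the rest pass over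
          have hL : pvPairsL.foldl pvStep ('(' :: t)
              = '(' :: (kv.2.toList ++ pvPairsL.foldl pvStep r) := by
            conv_lhs => rw [hdec, ← hr]
            rw [List.foldl_append, List.foldl_cons,
              pv_chain_pass kv.1.toList hparen.1 as r
                (fun a ha => ⟨(hpair.2.2 a ha _ (List.mem_cons_self ..)).1,
                  (hpair.2.2 a ha _ (List.mem_cons_self ..)).2.1⟩),
              show pvStep ('(' :: (kv.1.toList ++ as.foldl pvStep r)) (kv.1.toList, kv.2.toList)
                  = '(' :: (kv.2.toList ++ pvStep (as.foldl pvStep r) (kv.1.toList, kv.2.toList)) from by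
                rw [pvStep, show '(' :: (kv.1.toList ++ as.foldl pvStep r)
                    = ('(' :: kv.1.toList) ++ as.foldl pvStep r from rfl, pv_replOne_hit]; rfl,
              pv_chain_pass kv.2.toList hparen.2 bs _
                (fun b hb => ⟨(hpair.2.1.1 b hb).2.2.1, (hpair.2.1.1 b hb).2.2.2⟩),
              show bs.foldl pvStep (pvStep (as.foldl pvStep r) (kv.1.toList, kv.2.toList))
                  = pvPairsL.foldl pvStep r from by
                rw [hdec, List.foldl_append, List.foldl_cons]]
          rw [hL, ih r (by rw [← hr] at ht; simp at ht; omega), pvAltGo]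
          have hdrop' : List.drop kv.1.length t = r := by simpa using hdrop
          simp [hf, hdrop']
      · rw [pv_chain_cons hc pvPairsL t, ih t ht, pvAltGo]
        simp [hc]

lemma pv_A_toList : ∀ (ks : List (String × String)) (s : String),
    (ks.foldl (fun t kv => PySem.Str.replace t ("(" ++ kv.1) ("(" ++ kv.2)) s).toList
      = (ks.map (fun kv => (kv.1.toList, kv.2.toList))).foldl pvStep s.toList := by
  intro ks
  induction ks with
  | nil => intro s; rfl
  | cons kv ks' ih =>
    intro s
    rw [List.foldl_cons, ih, List.map_cons, List.foldl_cons]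
    congr 1
    rw [PySem.Str.toList_replace, show ("(" ++ kv.1).toList = '(' :: kv.1.toList from by simp,
      show ("(" ++ kv.2).toList = '(' :: kv.2.toList from by simp,
      pv_replace_eq _ _ _ (by simp)]
    rfl

-- ===== VERDICT (by name: the statement is the Claim_ definition above) =====
theorem to_universal_tags_spec : Claim_equal_to_universal_tags := by
  intro text _
  unfold Spec_to_universal_tags to_universal_tags to_universal_tags_alt
  have h := pv_A_toList pvReplacements text
  rw [show (pvReplacements.map (fun kv => (kv.1.toList, kv.2.toList))) = pvPairsL from rfl] at h
  rw [pv_main text.toList.length text.toList le_rfl] at h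
  rw [← h, String.ofList_toList]
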